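-- pv_equiv track=rewrite | github.com/PercyWei/Silent-SP-Detection | agent_app/log.py | replace_html_tags
-- ===== SOURCE A (Python) =====
-- def replace_html_tags(content: str):
--     """
--     Helper method to process the content before printing to markdown.
--     """
--     # FIXME: Need update!
--     replace_dict = {
--         "<...>": "[...]",
--         "<null>": "[null]",
--         "<commit>": "[commit]",
--         "<file>": "[file]",
--         "<old_file>": "[old_file]",
--         "<new_file>": "[new_file]",
--         "<class>": "[class]",
--         "<func>": "[func]",
--         "<method>": "[method]",
--         "<hunk>": "[hunk]",
--         "<code>": "[code]",
--         "<original>": "[original]",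
--         "<patched>": "[patched]",
--         "</...>": "[/...]",
--         "</null>": "[/null]",
--         "</commit>": "[/commit]",
--         "</file>": "[/file]",
--         "</ld_file>": "[/old_file]",
--         "</new_file>": "[/new_file]",
--         "</class>": "[/class]",
--         "</func>": "[/func]",
--         "</method>": "[/method]",
--         "</hunk>": "[/hunk]",
--         "</code>": "[/code]",
--         "</original>": "[/original]",
--         "</patched>": "[/patched]",
--     }
--     for key, value in replace_dict.items():
--         content = content.replace(key, value)
--     return content
-- ===== SOURCE B (Python) =====
-- # Single left-to-right scan substituting tags as they are met, instead of 26
-- # sequential full-string .replace() passes (same result: tags are prefix-free,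
-- # start with '<' and never appear inside a replacement).
-- _TABLE = [
--     ("<...>", "[...]"),
--     ("<null>", "[null]"),
--     ("<commit>", "[commit]"),
--     ("<file>", "[file]"),
--     ("<old_file>", "[old_file]"),
--     ("<new_file>", "[new_file]"),
--     ("<class>", "[class]"),
--     ("<func>", "[func]"),
--     ("<method>", "[method]"),
--     ("<hunk>", "[hunk]"),
--     ("<code>", "[code]"),
--     ("<original>", "[original]"),
--     ("<patched>", "[patched]"),
--     ("</...>", "[/...]"),
--     ("</null>", "[/null]"),
--     ("</commit>", "[/commit]"),
--     ("</file>", "[/file]"),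
--     ("</ld_file>", "[/old_file]"),
--     ("</new_file>", "[/new_file]"),
--     ("</class>", "[/class]"),
--     ("</func>", "[/func]"),
--     ("</method>", "[/method]"),
--     ("</hunk>", "[/hunk]"),
--     ("</code>", "[/code]"),
--     ("</original>", "[/original]"),
--     ("</patched>", "[/patched]"),
-- ]
--
--
-- def replace_html_tags(content: str):
--     """
--     Helper method to process the content before printing to markdown.
--     """
--     out = []
--     i = 0
--     n = len(content)
--     while i < n:
--         if content[i] == "<":
--             for key, value in _TABLE:
--                 if content.startswith(key, i):
--                     out.append(value)
--                     i += len(key)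
--                     break
--             else:
--                 out.append(content[i])
--                 i += 1
--         else:
--             out.append(content[i])
--             i += 1
--     return "".join(out)
-- ===== Notes on version B (the rewrite author's own statement) =====
-- stated objective: alternative
-- what changed: A runs 26 sequential full-string .replace() passes, one per tag; B makes a single left-to-right pass over the string, substituting at each position the first tag of the same table that starts there (safe because the tags are prefix-free, start with '<' and never occur inside a replacement).
import Mathlib
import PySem

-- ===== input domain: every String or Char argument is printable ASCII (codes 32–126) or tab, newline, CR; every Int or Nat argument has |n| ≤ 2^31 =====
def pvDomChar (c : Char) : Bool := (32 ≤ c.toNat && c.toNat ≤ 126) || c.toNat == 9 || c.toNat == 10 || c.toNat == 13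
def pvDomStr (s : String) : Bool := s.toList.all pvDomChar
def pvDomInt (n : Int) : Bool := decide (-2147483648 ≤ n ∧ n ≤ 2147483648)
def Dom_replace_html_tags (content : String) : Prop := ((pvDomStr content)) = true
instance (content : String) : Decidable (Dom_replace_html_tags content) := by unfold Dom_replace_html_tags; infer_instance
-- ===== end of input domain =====

-- B replaces A's 26 sequential full-string .replace passes by one left-to-right scan that
-- substitutes the first matching tag at each position (objective: alternative algorithm, same result).

-- ===== PORT A =====
-- the dict literal of A, as an association list in insertion order
def pvReplaceItems : List (String × String) :=
  [("<...>", "[...]"), ("<null>", "[null]"), ("<commit>", "[commit]"), ("<file>", "[file]"),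
   ("<old_file>", "[old_file]"), ("<new_file>", "[new_file]"), ("<class>", "[class]"),
   ("<func>", "[func]"), ("<method>", "[method]"), ("<hunk>", "[hunk]"), ("<code>", "[code]"),
   ("<original>", "[original]"), ("<patched>", "[patched]"), ("</...>", "[/...]"),
   ("</null>", "[/null]"), ("</commit>", "[/commit]"), ("</file>", "[/file]"),
   ("</ld_file>", "[/old_file]"), ("</new_file>", "[/new_file]"), ("</class>", "[/class]"),
   ("</func>", "[/func]"), ("</method>", "[/method]"), ("</hunk>", "[/hunk]"),
   ("</code>", "[/code]"), ("</original>", "[/original]"), ("</patched>", "[/patched]")]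

def replace_html_tags (content : String) : String :=
  pvReplaceItems.foldl (fun content kv => PySem.Str.replace content kv.1 kv.2) content

-- ===== PORT B =====
-- B's table (Source B's _TABLE), on the character-list side (B scans character by character)
def pvTableB : List (List Char × List Char) :=
  [("<...>".toList, "[...]".toList),
   ("<null>".toList, "[null]".toList),
   ("<commit>".toList, "[commit]".toList),
   ("<file>".toList, "[file]".toList),
   ("<old_file>".toList, "[old_file]".toList),
   ("<new_file>".toList, "[new_file]".toList),
   ("<class>".toList, "[class]".toList),
   ("<func>".toList, "[func]".toList),
   ("<method>".toList, "[method]".toList),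
   ("<hunk>".toList, "[hunk]".toList),
   ("<code>".toList, "[code]".toList),
   ("<original>".toList, "[original]".toList),
   ("<patched>".toList, "[patched]".toList),
   ("</...>".toList, "[/...]".toList),
   ("</null>".toList, "[/null]".toList),
   ("</commit>".toList, "[/commit]".toList),
   ("</file>".toList, "[/file]".toList),
   ("</ld_file>".toList, "[/old_file]".toList),
   ("</new_file>".toList, "[/new_file]".toList),
   ("</class>".toList, "[/class]".toList),
   ("</func>".toList, "[/func]".toList),
   ("</method>".toList, "[/method]".toList),
   ("</hunk>".toList, "[/hunk]".toList),
   ("</code>".toList, "[/code]".toList),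
   ("</original>".toList, "[/original]".toList),
   ("</patched>".toList, "[/patched]".toList)]

-- needed by pvScan's termination proof (cited in decreasing_by)
theorem pvTableB_keylen : ∀ p ∈ pvTableB, 0 < p.1.length := by decide

-- B's while-loop: one pass; at '<' try the tags in table order, else copy the character
def pvScan : List Char → List Char
  | [] => []
  | c :: t =>
    if c = '<' then
      match h : pvTableB.find? (fun p => p.1.isPrefixOf (c :: t)) with
      | some p => p.2 ++ pvScan ((c :: t).drop p.1.length)
      | none => c :: pvScan t
    else c :: pvScan t
termination_by s => s.length
decreasing_by
  · have := pvTableB_keylen _ (List.mem_of_find?_eq_some h)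
    simp only [List.length_drop, List.length_cons]; omega
  · simp
  · simp

def replace_html_tags_alt (content : String) : String :=
  String.ofList (pvScan content.toList)

-- ===== PRECONDITION & SPEC =====
def Spec_replace_html_tags (content : String) (out : String) : Prop := out = replace_html_tags_alt content
instance (content : String) (out : String) : Decidable (Spec_replace_html_tags content out) := by unfold Spec_replace_html_tags; infer_instance

-- ===== CLAIM (what is proved, stated in full; the proofs are below) =====
def Claim_equal_replace_html_tags : Prop := ∀ (content : String), Dom_replace_html_tags content → Spec_replace_html_tags content (replace_html_tags content)

-- ===== LEMMAS AND PROOFS =====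

-- a structural-recursion reading of Python's str.replace (PySem.Chars.replace)
def pvCrep (old new : List Char) : List Char → List Char
  | [] => []
  | c :: t =>
    if old.isPrefixOf (c :: t) then new ++ pvCrep old new (t.drop (old.length - 1))
    else c :: pvCrep old new t
termination_by s => s.length
decreasing_by
  · simp only [List.length_drop, List.length_cons]; omega
  · simp

theorem pvCrep_nil (k v : List Char) : pvCrep k v [] = [] := by simp [pvCrep]

theorem pvCrep_cons_neg (k v : List Char) (c : Char) (t : List Char) (h : ¬ k <+: (c :: t)) :
    pvCrep k v (c :: t) = c :: pvCrep k v t := by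
  rw [pvCrep, if_neg]
  simpa [List.isPrefixOf_iff_prefix] using h

theorem pvCrep_prefix (k v X : List Char) (hk : k ≠ []) :
    pvCrep k v (k ++ X) = v ++ pvCrep k v X := by
  cases k with
  | nil => exact absurd rfl hk
  | cons c kt =>
    rw [List.cons_append, pvCrep,
      if_pos (show (c :: kt).isPrefixOf (c :: (kt ++ X)) = true by
        simp only [List.isPrefixOf_iff_prefix]; exact ⟨X, by simp⟩)]
    have hdrop : (kt ++ X).drop ((c :: kt).length - 1) = X := by
      simp
    rw [hdrop]

theorem pvGo_eq (old new : List Char) (ho : old ≠ []) :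
    ∀ (fuel : Nat) (l acc : List Char), l.length ≤ fuel →
      PySem.Chars.replace.go old new fuel l acc = acc.reverse ++ pvCrep old new l := by
  intro fuel
  induction fuel with
  | zero =>
    intro l acc h
    have hl : l = [] := by cases l with
      | nil => rfl
      | cons a b => simp at h
    subst hl
    simp [PySem.Chars.replace.go, pvCrep_nil]
  | succ n ih =>
    intro l acc h
    cases l with
    | nil => simp [PySem.Chars.replace.go, pvCrep_nil]
    | cons c t =>
      rw [PySem.Chars.replace.go]
      by_cases hp : old.isPrefixOf (c :: t)
      · rw [if_pos hp]
        have hlen : 0 < old.length := List.length_pos_of_ne_nil ho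
        have hd : (c :: t).drop old.length = t.drop (old.length - 1) := by
          cases old with
          | nil => exact absurd rfl ho
          | cons o ot => simp
        rw [ih _ _ (by simp only [hd, List.length_drop]; simp at h; omega)]
        rw [pvCrep, if_pos hp, hd]
        simp
      · rw [if_neg hp]
        rw [ih _ _ (by simp at h ⊢; omega)]
        rw [pvCrep, if_neg hp]
        simp

theorem pvReplace_eq (old new s : List Char) (ho : old ≠ []) :
    PySem.Chars.replace s old new = pvCrep old new s := by
  rw [PySem.Chars.replace, if_neg (by simpa [List.isEmpty_iff] using ho)]
  simpa using pvGo_eq old new ho s.length s [] le_rfl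

-- one fold step of the chain of crep-replaces
def pvStep (w : List Char) (p : List Char × List Char) : List Char := pvCrep p.1 p.2 w

-- shape facts about the table, checked by computation
theorem pvFacts : ∀ p ∈ pvTableB,
    p.1.head? = some '<' ∧ '<' ∉ p.1.tail ∧ '[' ∉ p.1 ∧ '>' ∉ p.1.dropLast ∧
    p.1.getLast? = some '>' ∧ p.2.head? = some '[' ∧ '<' ∉ p.2.tail := by decide

theorem pvKeyPrefix : ∀ p ∈ pvTableB, ∀ q ∈ pvTableB, p.1 <+: q.1 → p.1 = q.1 := by decide

-- a key can only be a prefix of q ++ X by being a prefix of q ('>' ends q, appears only last in keys)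
theorem pvPrefixBounded (p q X : List Char) (hq : q.getLast? = some '>') (hp : '>' ∉ p.dropLast)
    (hpre : p <+: q ++ X) : p <+: q := by
  by_cases hl : p.length ≤ q.length
  · exact List.prefix_of_prefix_length_le hpre (List.prefix_append q X) hl
  · exfalso
    have hqp : q <+: p := List.prefix_of_prefix_length_le (List.prefix_append q X) hpre (by omega)
    obtain ⟨r, hr⟩ := hqp
    have hrne : r ≠ [] := by
      intro h0
      rw [h0, List.append_nil] at hr
      exact hl (le_of_eq (by rw [hr]))
    apply hp
    rw [← hr, List.dropLast_append_of_ne_nil hrne]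
    exact List.mem_append_left _ (List.mem_of_getLast? hq)

-- a key never matches strictly inside a region whose tail has no '<'
theorem pvCrep_append (k v : List Char) (hk : k.head? = some '<') :
    ∀ (a X : List Char), '<' ∉ a.tail → ¬ k <+: (a ++ X) →
      pvCrep k v (a ++ X) = a ++ pvCrep k v X := by
  intro a
  induction a with
  | nil => intro X _ _; simp
  | cons c a' ih =>
    intro X ha hpre
    have h1 : pvCrep k v ((c :: a') ++ X) = c :: pvCrep k v (a' ++ X) := by
      rw [List.cons_append]
      exact pvCrep_cons_neg k v c (a' ++ X) (by rw [← List.cons_append]; exact hpre)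
    rw [h1]
    cases a' with
    | nil => simp
    | cons d a'' =>
      have hpre2 : ¬ k <+: (d :: a'') ++ X := by
        intro hp2
        cases hkc : k with
        | nil => rw [hkc] at hk; simp at hk
        | cons x kt =>
          rw [hkc] at hk hp2
          simp only [List.head?_cons, Option.some.injEq] at hk
          obtain ⟨r, hr⟩ := hp2
          rw [List.cons_append, List.cons_append] at hr
          have hd := (List.cons.inj hr).1
          apply ha
          show '<' ∈ d :: a''
          rw [← hk, hd]
          exact List.mem_cons_self ..
      rw [ih X (fun h => ha (List.mem_cons_of_mem _ h)) hpre2]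
      simp

-- "tag never matches at b ++ X when b starts with '['"
theorem pvHeadNe (k b X : List Char) (hk : k.head? = some '<') (hb : b.head? = some '[') :
    ¬ k <+: b ++ X := by
  intro hpre
  cases k with
  | nil => simp at hk
  | cons x kt =>
    cases b with
    | nil => simp at hb
    | cons y bt =>
      simp only [List.head?_cons, Option.some.injEq] at hk hb
      obtain ⟨r, hr⟩ := hpre
      rw [List.cons_append, List.cons_append] at hr
      have hxy := (List.cons.inj hr).1
      rw [hk, hb] at hxy
      exact absurd hxy (by decide)

-- truncations of a replace result: unchanged, or already containing a '['
theorem pvCrep_take (k v : List Char) (hv : v.head? = some '[') :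
    ∀ (u : List Char) (m : Nat), (pvCrep k v u).take m = u.take m ∨ '[' ∈ (pvCrep k v u).take m := by
  intro u
  induction u using pvCrep.induct (old := k) with
  | case1 => intro m; left; rw [pvCrep_nil]
  | case2 c t hp ih =>
    intro m
    rw [pvCrep, if_pos hp]
    cases m with
    | zero => left; rfl
    | succ m' =>
      right
      cases v with
      | nil => simp at hv
      | cons y vt =>
        simp only [List.head?_cons, Option.some.injEq] at hv
        simp [hv]
  | case3 c t hp ih =>
    intro m
    rw [pvCrep, if_neg hp]
    cases m with
    | zero => left; rfl
    | succ m' =>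
      rcases ih m' with h | h
      · left; simp [List.take_succ_cons, h]
      · right; simp [List.take_succ_cons]; right; exact h

-- pushing the whole chain over a region it can never match into
theorem pvPass (a : List Char) (ha : '<' ∉ a.tail) :
    ∀ L : List (List Char × List Char), (∀ q ∈ L, q.1.head? = some '<') →
      (∀ q ∈ L, ∀ X' : List Char, ¬ q.1 <+: a ++ X') →
      ∀ X, L.foldl pvStep (a ++ X) = a ++ L.foldl pvStep X := by
  intro L
  induction L with
  | nil => intro _ _ X; simp
  | cons q L' ih =>
    intro hh hnp X
    have h1 : pvStep (a ++ X) q = a ++ pvStep X q :=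
      pvCrep_append q.1 q.2 (hh q (List.mem_cons_self ..)) a X ha (hnp q (List.mem_cons_self ..) X)
    simp only [List.foldl_cons, h1]
    exact ih (fun p hp => hh p (List.mem_cons_of_mem _ hp))
      (fun p hp => hnp p (List.mem_cons_of_mem _ hp)) (pvStep X q)

-- when no tag matches at the head, the chain copies the head character
theorem pvChainCons (c : Char) (t : List Char) (hno : ∀ p ∈ pvTableB, ¬ p.1 <+: (c :: t)) :
    ∀ L : List (List Char × List Char), (∀ q ∈ L, q ∈ pvTableB) →
      ∀ u, (∀ m, u.take m = t.take m ∨ '[' ∈ u.take m) →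
        L.foldl pvStep (c :: u) = c :: L.foldl pvStep u := by
  intro L
  induction L with
  | nil => intro _ u _; simp
  | cons q L' ih =>
    intro hmem u hu
    have hq := hmem q (List.mem_cons_self ..)
    obtain ⟨hhead, _, hnolb, _, _, hvhead, _⟩ := pvFacts q hq
    have hnp : ¬ q.1 <+: (c :: u) := by
      intro hpre
      cases hk : q.1 with
      | nil => rw [hk] at hhead; simp at hhead
      | cons x kt =>
        rw [hk] at hpre hhead
        simp only [List.head?_cons, Option.some.injEq] at hhead
        obtain ⟨r, hr⟩ := hpre
        rw [List.cons_append] at hr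
        have hxc := (List.cons.inj hr).1
        have hur := (List.cons.inj hr).2
        have hktu : u.take kt.length = kt := by
          rw [← hur]
          exact List.take_left
        rcases hu kt.length with heq | hmem'
        · apply hno q hq
          rw [hk, hxc]
          refine ⟨t.drop kt.length, ?_⟩
          rw [List.cons_append]
          congr 1
          conv_rhs => rw [← List.take_append_drop kt.length t]
          rw [show t.take kt.length = kt by rw [← heq, hktu]]
        · rw [hktu] at hmem'
          apply hnolb
          rw [hk]
          exact List.mem_cons_of_mem _ hmem'
    simp only [List.foldl_cons]
    have h1 : pvStep (c :: u) q = c :: pvStep u q := pvCrep_cons_neg q.1 q.2 c u hnp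
    rw [h1]
    exact ih (fun p hp => hmem p (List.mem_cons_of_mem _ hp)) (pvStep u q)
      (fun m => (pvCrep_take q.1 q.2 hvhead u m).elim
        (fun h => (hu m).elim (fun h' => Or.inl (h.trans h')) (fun h' => Or.inr (h ▸ h')))
        Or.inr)

theorem pvChain_nil : ∀ L : List (List Char × List Char), L.foldl pvStep [] = [] := by
  intro L
  induction L with
  | nil => rfl
  | cons q L' ih => simpa [pvStep, pvCrep_nil] using ih

-- unfolding equations for pvScan's three branches
theorem pvScan_nil : pvScan [] = [] := by rw [pvScan]

theorem pvScan_some (t : List Char) (p : List Char × List Char)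
    (h : pvTableB.find? (fun q => q.1.isPrefixOf ('<' :: t)) = some p) :
    pvScan ('<' :: t) = p.2 ++ pvScan (('<' :: t).drop p.1.length) := by
  rw [pvScan, if_pos rfl]
  split
  · next p' heq =>
    rw [h] at heq
    injection heq with heq'
    rw [heq']
  · next heq =>
    rw [h] at heq
    simp at heq

theorem pvScan_none (t : List Char)
    (h : pvTableB.find? (fun q => q.1.isPrefixOf ('<' :: t)) = none) :
    pvScan ('<' :: t) = '<' :: pvScan t := by
  rw [pvScan, if_pos rfl]
  split
  · next p' heq =>
    rw [h] at heq
    simp at heq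
  · next => rfl

theorem pvScan_other (c : Char) (t : List Char) (hc : ¬ c = '<') :
    pvScan (c :: t) = c :: pvScan t := by
  rw [pvScan, if_neg hc]

-- the heart: the sequential chain of replaces equals the single scan
theorem pvChain_eq_scan : ∀ s : List Char, pvTableB.foldl pvStep s = pvScan s := by
  intro s
  induction s using pvScan.induct with
  | case1 => rw [pvScan_nil]; exact pvChain_nil _
  | case2 t p h ih =>
    rw [pvScan_some t p h]
    rw [List.find?_eq_some_iff_append] at h
    obtain ⟨hpred, pre, post, hsplit, hpre_no⟩ := h
    have hpmem : p ∈ pvTableB := by rw [hsplit]; exact List.mem_append_right _ (List.mem_cons_self ..)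
    obtain ⟨hkhead, hktail, _, hkdl, hklast, hvhead, hvtail⟩ := pvFacts p hpmem
    have hkne : p.1 ≠ [] := by intro h0; rw [h0] at hkhead; simp at hkhead
    obtain ⟨X, hX⟩ : p.1 <+: ('<' :: t) := List.isPrefixOf_iff_prefix.mp hpred
    have hdropX : ('<' :: t).drop p.1.length = X := by rw [← hX, List.drop_left]
    -- left side: split the fold at p
    rw [hsplit, List.foldl_append, List.foldl_cons]
    have hPass1 : pre.foldl pvStep ('<' :: t) = p.1 ++ pre.foldl pvStep X := by
      rw [← hX]
      apply pvPass p.1 hktail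
      · intro q hq
        exact (pvFacts q (by rw [hsplit]; exact List.mem_append_left _ hq)).1
      · intro q hq X' hpre'
        have hqmem : q ∈ pvTableB := by rw [hsplit]; exact List.mem_append_left _ hq
        have hqk : q.1 <+: p.1 :=
          pvPrefixBounded q.1 p.1 X' hklast (pvFacts q hqmem).2.2.2.1 hpre'
        have heq : q.1 = p.1 := pvKeyPrefix q hqmem p hpmem hqk
        have : ¬ q.1 <+: ('<' :: t) := by
          have hf := hpre_no q hq
          simp only [Bool.not_eq_true'] at hf
          intro hcontra
          rw [← List.isPrefixOf_iff_prefix] at hcontra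
          rw [hf] at hcontra
          exact Bool.false_ne_true hcontra
        exact this (heq ▸ hX ▸ List.prefix_append p.1 X)
    rw [hPass1]
    have hstep : pvStep (p.1 ++ pre.foldl pvStep X) p = p.2 ++ pvStep (pre.foldl pvStep X) p := by
      unfold pvStep
      exact pvCrep_prefix p.1 p.2 _ hkne
    rw [hstep]
    have hPass3 : post.foldl pvStep (p.2 ++ pvStep (pre.foldl pvStep X) p)
        = p.2 ++ post.foldl pvStep (pvStep (pre.foldl pvStep X) p) := by
      apply pvPass p.2 hvtail
      · intro q hq
        exact (pvFacts q (by rw [hsplit]; exact List.mem_append_right _ (List.mem_cons_of_mem _ hq))).1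
      · intro q hq X' hpre'
        exact pvHeadNe q.1 p.2 X'
          (pvFacts q (by rw [hsplit]; exact List.mem_append_right _ (List.mem_cons_of_mem _ hq))).1
          hvhead hpre'
    rw [hPass3]
    rw [hdropX] at ih ⊢
    rw [← ih, hsplit, List.foldl_append, List.foldl_cons]
  | case3 t h ih =>
    rw [pvScan_none t h]
    rw [List.find?_eq_none] at h
    have hno : ∀ p ∈ pvTableB, ¬ p.1 <+: ('<' :: t) := by
      intro p hp
      simpa [List.isPrefixOf_iff_prefix] using h p hp
    rw [← ih]
    exact pvChainCons '<' t hno pvTableB (fun q hq => hq) t (fun m => Or.inl rfl)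
  | case4 c t hc ih =>
    rw [pvScan_other c t hc]
    have hno : ∀ p ∈ pvTableB, ¬ p.1 <+: (c :: t) := by
      intro p hp hpre
      obtain ⟨hhead, _⟩ := pvFacts p hp
      cases hk : p.1 with
      | nil => rw [hk] at hhead; simp at hhead
      | cons x kt =>
        rw [hk] at hpre hhead
        simp only [List.head?_cons, Option.some.injEq] at hhead
        obtain ⟨r, hr⟩ := hpre
        rw [List.cons_append] at hr
        exact hc (by rw [← (List.cons.inj hr).1, hhead])
    rw [← ih]
    exact pvChainCons c t hno pvTableB (fun q hq => hq) t (fun m => Or.inl rfl)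

-- bridge from A's String-level fold to the char-level crep chain
theorem pvA_toList (L : List (String × String)) :
    ∀ content : String,
      (L.foldl (fun content kv => PySem.Str.replace content kv.1 kv.2) content).toList
        = (L.map (fun kv => (kv.1.toList, kv.2.toList))).foldl
            (fun w p => PySem.Chars.replace w p.1 p.2) content.toList := by
  induction L with
  | nil => intro content; simp
  | cons kv L' ih =>
    intro content
    simp only [List.foldl_cons, List.map_cons]
    rw [ih, PySem.Str.toList_replace]

theorem pvChain_replace_eq (L : List (List Char × List Char)) (hL : ∀ p ∈ L, p.1 ≠ []) :
    ∀ u, L.foldl (fun w p => PySem.Chars.replace w p.1 p.2) u = L.foldl pvStep u := by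
  induction L with
  | nil => intro u; rfl
  | cons q L' ih =>
    intro u
    simp only [List.foldl_cons]
    rw [pvReplace_eq q.1 q.2 u (hL q (List.mem_cons_self ..)), ih (fun p hp => hL p (List.mem_cons_of_mem _ hp))]
    rfl

-- ===== VERDICT (by name: the statement is the Claim_ definition above) =====
theorem replace_html_tags_spec : Claim_equal_replace_html_tags := by
  intro content _
  show replace_html_tags content = replace_html_tags_alt content
  apply String.toList_inj.mp
  rw [replace_html_tags_alt]
  have halt : (String.ofList (pvScan content.toList)).toList = pvScan content.toList := by simp
  rw [halt, replace_html_tags, pvA_toList]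
  rw [show pvReplaceItems.map (fun kv => (kv.1.toList, kv.2.toList)) = pvTableB by decide]
  rw [pvChain_replace_eq pvTableB (fun p hp => by have := pvTableB_keylen p hp; intro h0; rw [h0] at this; simp at this)]
  exact pvChain_eq_scan content.toList
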